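-- pv_equiv track=rewrite | github.com/omkarsindha/ProbeDeployer | utils.py | is_multicast
-- ===== SOURCE A (Python) =====
-- def is_multicast(ip):
--     try:
--         # Convert IP address to 32-bit integer
--         parts = [int(part) for part in ip.split('.')]
--         if len(parts) != 4 or not all(0 <= p <= 255 for p in parts):
--             return False
--         return 224 <= parts[0] <= 239
--     except Exception as e:
--         return False
-- ===== SOURCE B (Python) =====
-- def is_multicast(ip):
--     parts = ip.split('.')
--     if len(parts) != 4:
--         return False
--     n = 0
--     for part in parts:
--         try:
--             p = int(part)
--         except Exception:
--             return False
--         if p < 0 or p > 255: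
--             return False
--         n = n * 256 + p
--     return 0xE0000000 <= n <= 0xEFFFFFFF
-- ===== Notes on version B (the rewrite author's own statement) =====
-- stated objective: alternative
-- what changed: B checks the part count first and then makes a single early-exit pass that parses and range-checks each octet while accumulating a 32-bit integer, tested against the multicast block bounds, instead of A's staged comprehension + all() + first-octet comparison inside one try.
import Mathlib
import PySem

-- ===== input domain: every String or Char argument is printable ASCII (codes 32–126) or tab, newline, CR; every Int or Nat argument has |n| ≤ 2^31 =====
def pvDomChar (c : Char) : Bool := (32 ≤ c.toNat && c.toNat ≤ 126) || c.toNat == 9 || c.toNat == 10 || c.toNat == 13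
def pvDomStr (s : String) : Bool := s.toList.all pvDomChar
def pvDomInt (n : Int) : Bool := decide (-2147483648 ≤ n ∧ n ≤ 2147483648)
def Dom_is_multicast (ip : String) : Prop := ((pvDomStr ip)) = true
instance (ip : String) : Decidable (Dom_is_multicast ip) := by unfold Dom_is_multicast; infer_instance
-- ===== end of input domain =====

-- B replaces A's staged comprehension + all() + first-octet comparison with a
-- length-first single early-exit pass that parses/range-checks each octet while
-- folding the address into one 32-bit integer tested against the multicast bounds.


-- ===== PORT A =====
-- ip.split(".") : sep "." is nonempty so split? is always some, getD never defaults
-- [int(part) for part in …]: none = some int() raised, caught by the except → False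
def pvIntsA : List String → Option (List Int)
  | [] => some []
  | s :: rest =>
    match PySem.Int.ofStr? s, pvIntsA rest with
    | some v, some vs => some (v :: vs)
    | _, _ => none

def is_multicast (ip : String) : Bool :=
  match pvIntsA ((PySem.Str.split? ip ".").getD []) with
  | none => false
  | some parts =>
    if ¬ (parts.length = 4 ∧ parts.all (fun p => decide (0 ≤ p ∧ p ≤ 255))) then false
    else
      match parts with
      | p0 :: _ => decide (224 ≤ p0 ∧ p0 ≤ 239)
      | [] => false  -- unreachable: length = 4

-- ===== PORT B =====
-- the for-loop of B: parse each part, range-check it, accumulate n; early return False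
def pvLoopB : List String → Int → Bool
  | [], n => decide (0xE0000000 ≤ n ∧ n ≤ 0xEFFFFFFF)
  | s :: rest, n =>
    match PySem.Int.ofStr? s with
    | none => false
    | some p => if p < 0 ∨ p > 255 then false else pvLoopB rest (n * 256 + p)

def is_multicast_alt (ip : String) : Bool :=
  let parts := (PySem.Str.split? ip ".").getD []
  if parts.length ≠ 4 then false else pvLoopB parts 0

-- ===== PRECONDITION & SPEC =====
def Spec_is_multicast (ip : String) (out : Bool) : Prop := out = is_multicast_alt ip
instance (ip : String) (out : Bool) : Decidable (Spec_is_multicast ip out) := by unfold Spec_is_multicast; infer_instance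

-- ===== CLAIM (what is proved, stated in full; the proofs are below) =====
def Claim_equal_is_multicast : Prop := ∀ (ip : String), Dom_is_multicast ip → Spec_is_multicast ip (is_multicast ip)

-- ===== LEMMAS AND PROOFS =====
theorem pvIntsA_length {l : List String} {parts : List Int}
    (h : pvIntsA l = some parts) : parts.length = l.length := by
  induction l generalizing parts with
  | nil => simp [pvIntsA] at h; simp [← h]
  | cons s rest ih =>
    simp only [pvIntsA] at h
    cases h0 : PySem.Int.ofStr? s with
    | none => simp [h0] at h
    | some v =>
      cases h1 : pvIntsA rest with
      | none => simp [h0, h1] at h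
      | some vs =>
        simp only [h0, h1] at h
        cases h; simp [ih h1]

-- ===== VERDICT (by name: the statement is the Claim_ definition above) =====
theorem is_multicast_spec : Claim_equal_is_multicast := by
  unfold Claim_equal_is_multicast Spec_is_multicast
  intro ip _
  unfold is_multicast is_multicast_alt
  set l := (PySem.Str.split? ip ".").getD [] with hl
  by_cases hlen : l.length = 4
  · -- four parts: exhaustive case analysis on the four parses
    match l, hlen with
    | [s0, s1, s2, s3], _ =>
      simp only [List.length_cons, List.length_nil]
      cases h0 : PySem.Int.ofStr? s0 with
      | none => simp [pvIntsA, pvLoopB, h0]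
      | some p0 =>
        cases h1 : PySem.Int.ofStr? s1 with
        | none => simp [pvIntsA, pvLoopB, h0, h1]
        | some p1 =>
          cases h2 : PySem.Int.ofStr? s2 with
          | none => simp [pvIntsA, pvLoopB, h0, h1, h2]
          | some p2 =>
            cases h3 : PySem.Int.ofStr? s3 with
            | none => simp [pvIntsA, pvLoopB, h0, h1, h2, h3]
            | some p3 =>
              simp only [pvIntsA, pvLoopB, h0, h1, h2, h3, List.all_cons, List.all_nil,
                List.length_cons, List.length_nil, Bool.and_true, Bool.and_eq_true,
                decide_eq_true_eq]
              rw [if_neg (show ¬((0:ℕ)+1+1+1+1 ≠ 4) by omega)]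
              by_cases r0 : p0 < 0 ∨ p0 > 255
              · rw [if_pos r0, if_pos (by omega)]
              · rw [if_neg r0]
                by_cases r1 : p1 < 0 ∨ p1 > 255
                · rw [if_pos r1, if_pos (by omega)]
                · rw [if_neg r1]
                  by_cases r2 : p2 < 0 ∨ p2 > 255
                  · rw [if_pos r2, if_pos (by omega)]
                  · rw [if_neg r2]
                    by_cases r3 : p3 < 0 ∨ p3 > 255
                    · rw [if_pos r3, if_pos (by omega)]
                    · rw [if_neg r3, if_neg (by
                        simp only [not_not, true_and]
                        omega)]
                      simp only [decide_eq_decide]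
                      omega
  · -- wrong part count: both sides return False
    rw [if_pos hlen]
    cases h : pvIntsA l with
    | none => rfl
    | some parts =>
      have := pvIntsA_length h
      dsimp only
      rw [if_pos (by omega)]
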